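-- pv_equiv track=rewrite | github.com/daniel-reich/turbo-robot | mrrKngM2fqDEDMXtS_10.py | can_patch
-- ===== SOURCE A (Python) =====
-- def can_patch(bridge, planks):
--   s=0
--   c=0
--   switch=False
--   if len(planks)==0:
--     switch=True
--   for b in bridge:
--     if b != 0:
--       if c>s:
--         s=c
--       if c>0:
--         if c-1 in planks:
--           planks.remove(c-1)
--         elif c in planks:
--           planks.remove(c)
--         else:
--           if switch==True:
--             c=0
--             continue
--           else:
--             return False
--         c=0
--       else:
--         c=0
--     if b ==0:
--       c+=1
--   if s<=1 or switch==False: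
--     return True
--   else:
--     return False
-- ===== SOURCE B (Python) =====
-- def can_patch(bridge, planks):
--     # Return-value equivalent to A; A mutates planks in place, B leaves it untouched.
--     if not planks:
--         # No planks: succeed iff the bridge, after ignoring trailing zeros,
--         # never has two adjacent zeros.
--         n = len(bridge)
--         while n > 0 and bridge[n - 1] == 0:
--             n -= 1
--         return all(not (bridge[i] == 0 and bridge[i + 1] == 0)
--                    for i in range(n - 1))
--     # Keep the planks in a sorted working list; each interior zero-run of
--     # length g takes the smallest available plank in [g-1, g], found by
--     # binary search.
--     avail = sorted(planks)
--     i, n = 0, len(bridge)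
--     while True:
--         g = 0
--         while i < n and bridge[i] == 0:
--             i += 1
--             g += 1
--         if i == n:
--             return True
--         if g > 0:
--             j = _lower_bound(avail, g - 1, 0, len(avail))
--             if j == len(avail) or avail[j] > g:
--                 return False
--             del avail[j]
--         i += 1
--
--
-- def _lower_bound(a, x, lo, hi):
--     if lo >= hi:
--         return lo
--     mid = (lo + hi) // 2
--     if a[mid] < x:
--         return _lower_bound(a, x, mid + 1, hi)
--     return _lower_bound(a, x, lo, mid)
-- ===== Notes on version B (the rewrite author's own statement) =====
-- stated objective: alternative
-- what changed: A is a one-pass state machine with a running max and in-place list.remove membership scans; B strips trailing zeros and checks for adjacent zeros when planks is empty, and otherwise consumes a sorted working list by recursive binary search, taking the smallest available plank in [g-1, g] for each zero-run of length g.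
import Mathlib
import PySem

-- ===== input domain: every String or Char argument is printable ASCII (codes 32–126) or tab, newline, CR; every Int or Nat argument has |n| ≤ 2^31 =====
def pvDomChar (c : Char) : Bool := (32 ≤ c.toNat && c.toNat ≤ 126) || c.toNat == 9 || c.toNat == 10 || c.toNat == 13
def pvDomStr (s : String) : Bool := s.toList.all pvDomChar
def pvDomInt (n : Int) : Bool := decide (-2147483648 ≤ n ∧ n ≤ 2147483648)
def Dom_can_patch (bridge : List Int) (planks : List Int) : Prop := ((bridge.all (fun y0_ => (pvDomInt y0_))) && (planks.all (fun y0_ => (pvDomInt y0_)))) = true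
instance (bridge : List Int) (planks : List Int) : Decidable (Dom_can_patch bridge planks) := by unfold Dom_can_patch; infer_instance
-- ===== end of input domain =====

-- B replaces A's one-pass state machine (running max + list.remove membership scans) by a
-- trailing-strip/adjacent-zeros check when planks is empty, and otherwise a sorted working
-- list consumed by binary search; return-value equivalence only: the Python A mutates
-- `planks` in place, B does not (objective: alternative).

-- ===== PORT A =====
def can_patch_go (switch : Bool) (s c : Int) (planks : List Int) : List Int → Bool
  | [] => decide (s ≤ 1) || (switch == false)
  | b :: rest =>
    if b ≠ 0 then
      let s' := if c > s then c else s
      if c > 0 then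
        if planks.contains (c - 1) then
          can_patch_go switch s' 0 ((PySem.List.remove? planks (c - 1)).getD planks) rest
        else if planks.contains c then
          can_patch_go switch s' 0 ((PySem.List.remove? planks c).getD planks) rest
        else if switch then can_patch_go switch s' 0 planks rest
        else false
      else can_patch_go switch s' 0 planks rest
    else can_patch_go switch s (c + 1) planks rest

def can_patch (bridge : List Int) (planks : List Int) : Bool :=
  can_patch_go (planks.length == 0) 0 0 planks bridge

-- ===== PORT B =====
-- port of Source B's `while n > 0 and bridge[n-1] == 0: n -= 1` (indexing is in range, so getD is exact)
def stripLen (xs : List Int) (n : Nat) : Nat :=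
  if h : 0 < n ∧ xs.getD (n - 1) 1 == 0 then stripLen xs (n - 1) else n
termination_by n
decreasing_by omega

-- port of Source B's `_lower_bound` (recursive binary search; all indexing is in range, so getD is exact)
def lowerBound (a : List Int) (x : Int) (lo hi : Nat) : Nat :=
  if h : lo ≥ hi then lo
  else
    let mid := (lo + hi) / 2
    if a.getD mid 0 < x then lowerBound a x (mid + 1) hi
    else lowerBound a x lo mid
termination_by hi - lo
decreasing_by all_goals omega

def leadZeros : List Int → Nat
  | [] => 0
  | b :: r => if b == 0 then leadZeros r + 1 else 0

theorem leadZeros_le (xs : List Int) : leadZeros xs ≤ xs.length := by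
  induction xs with
  | nil => simp [leadZeros]
  | cons b r ih => simp only [leadZeros, List.length_cons]; split <;> omega

-- port of Source B's main `while True` loop (index i becomes the suffix `bridge`;
-- `del avail[j]` becomes take/drop concatenation)
def consume (bridge : List Int) (avail : List Int) : Bool :=
  let g := leadZeros bridge
  if hg : g = bridge.length then true
  else
    if 0 < g then
      let j := lowerBound avail ((g : Int) - 1) 0 avail.length
      if j = avail.length ∨ (g : Int) < avail.getD j 0 then false
      else consume (bridge.drop (g + 1)) (avail.take j ++ avail.drop (j + 1))
    else consume (bridge.drop (g + 1)) avail
termination_by bridge.length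
decreasing_by
  all_goals
    have := leadZeros_le bridge
    simp only [List.length_drop]
    omega

def can_patch_alt (bridge : List Int) (planks : List Int) : Bool :=
  if planks.length = 0 then
    let n := stripLen bridge bridge.length
    (List.range (n - 1)).all (fun i => !(bridge.getD i 1 == 0 && bridge.getD (i + 1) 1 == 0))
  else consume bridge (PySem.List.sorted planks (fun x => x) false)

-- ===== PRECONDITION & SPEC =====
def Spec_can_patch (bridge : List Int) (planks : List Int) (out : Bool) : Prop := out = can_patch_alt bridge planks
instance (bridge : List Int) (planks : List Int) (out : Bool) : Decidable (Spec_can_patch bridge planks out) := by unfold Spec_can_patch; infer_instance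

-- ===== CLAIM (what is proved, stated in full; the proofs are below) =====
def Claim_equal_can_patch : Prop := ∀ (bridge : List Int) (planks : List Int), Dom_can_patch bridge planks → Spec_can_patch bridge planks (can_patch bridge planks)

-- ===== LEMMAS AND PROOFS =====

-- reference scan for the empty-planks case: every zero-run followed by a nonzero has length ≤ 1
def runA : Int → List Int → Bool
  | _, [] => true
  | c, x :: r => if x == 0 then runA (c + 1) r else (decide (c ≤ 1) && runA 0 r)

-- reference adjacent-zeros scan with a "previous element was zero" flag
def run1 : Bool → List Int → Bool
  | _, [] => true
  | p, x :: r => if x == 0 then (if p then false else run1 true r) else run1 false r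

-- structural adjacent-pair check
def noAdj : List Int → Bool
  | [] => true
  | [_] => true
  | a :: b :: r => !(a == 0 && b == 0) && noAdj (b :: r)

theorem go_empty_eq_runA (bridge : List Int) : ∀ s c : Int, 0 ≤ c →
    can_patch_go true s c [] bridge = (decide (s ≤ 1) && runA c bridge) := by
  induction bridge with
  | nil => intro s c _; simp [can_patch_go, runA]
  | cons b r ih =>
    intro s c hc0
    by_cases hb : b = 0
    · simp only [can_patch_go, runA, hb, if_neg (by simp : ¬(0:Int) ≠ 0), beq_self_eq_true,
        if_pos trivial]
      exact ih s (c + 1) (by omega)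
    · have h1 : (b == 0) = false := by simp [hb]
      by_cases hc : c > 0
      · have hm : decide ((if c > s then c else s) ≤ 1) = (decide (s ≤ 1) && decide (c ≤ 1)) := by
          by_cases h : c > s <;> by_cases h1 : s ≤ 1 <;> by_cases h2 : c ≤ 1 <;>
            first
            | (simp [h, h1, h2]; omega)
            | simp [h, h1, h2]
        simp [can_patch_go, runA, hb, h1, hc, ih _ _ le_rfl, hm, Bool.and_assoc]
      · have hc' : c = 0 := by omega
        have hs : decide ((if s < 0 then (0:Int) else s) ≤ 1) = decide (s ≤ 1) := by
          by_cases h : s < 0 <;> simp [h] <;> omega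
        simp [can_patch_go, runA, hb, h1, hc', ih _ _ le_rfl, hs]

theorem runA_zeros (z : List Int) (hz : ∀ a ∈ z, a = 0) : ∀ c : Int, runA c z = true := by
  induction z with
  | nil => intro c; simp [runA]
  | cons a t iht =>
    intro c
    have ha : a = 0 := hz a (by simp)
    simp only [runA, ha]
    simpa using iht (fun b hb => hz b (by simp [hb])) (c + 1)

theorem runA_append_zeros (z : List Int) (hz : ∀ a ∈ z, a = 0) (u : List Int) :
    ∀ c : Int, runA c (u ++ z) = runA c u := by
  induction u with
  | nil => intro c; simp [runA, runA_zeros z hz c]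
  | cons x r ih =>
    intro c
    by_cases hx : x = 0 <;> simp [runA, hx, ih]

theorem runA_eq_run1 (u : List Int) (hu : ∀ h : u ≠ [], u.getLast h ≠ 0) :
    ∀ c : Int, 0 ≤ c → u ≠ [] →
      runA c u = (decide (c ≤ 1) && run1 (decide (0 < c)) u) := by
  induction u with
  | nil => intro c _ h; exact absurd rfl h
  | cons x r ih =>
    intro c hc _
    by_cases hr : r = []
    · subst hr
      have hx : x ≠ 0 := by simpa using hu (by simp)
      simp [runA, run1, hx]
    · have hu' : ∀ h : r ≠ [], r.getLast h ≠ 0 := by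
        intro h
        have := hu (by simp)
        rwa [List.getLast_cons h] at this
      by_cases hx : x = 0
      · subst hx
        rw [show runA c (0 :: r) = runA (c + 1) r from by simp [runA]]
        rw [ih hu' (c + 1) (by omega) hr]
        by_cases h0 : c = 0
        · subst h0; simp [run1]
        · have hgt : (0 : Int) < c := by omega
          have : ¬ (c + 1 ≤ 1) := by omega
          simp [run1, hgt, this]
      · have hx' : (x == 0) = false := by simp [hx]
        rw [show runA c (x :: r) = (decide (c ≤ 1) && runA 0 r) from by simp [runA, hx']]
        rw [ih hu' 0 (by omega) hr]
        simp [run1, hx']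


theorem noAdj_eq_run1 (u : List Int) : ∀ a : Int, noAdj (a :: u) = run1 (a == 0) u := by
  induction u with
  | nil => intro a; simp [noAdj, run1]
  | cons b r ih =>
    intro a
    by_cases hb : b = 0
    · subst hb
      by_cases ha : a = 0 <;> simp [noAdj, run1, ha, ih]
    · have hb' : (b == 0) = false := by simp [hb]
      simp [noAdj, run1, hb', ih]


theorem rangeAll_eq_noAdj (u : List Int) :
    (List.range (u.length - 1)).all (fun i => !(u.getD i 1 == 0 && u.getD (i + 1) 1 == 0))
      = noAdj u := by
  match u with
  | [] => simp [noAdj]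
  | [a] => simp [noAdj]
  | a :: b :: r =>
    have ih := rangeAll_eq_noAdj (b :: r)
    simp only [List.length_cons] at *
    rw [show r.length + 1 + 1 - 1 = r.length + 1 from rfl, List.range_succ_eq_map]
    simp only [List.all_cons, List.all_map, Function.comp_def, List.getD_cons_succ,
      List.getD_cons_zero, noAdj]
    rw [show r.length + 1 - 1 = r.length from rfl] at ih
    simp only [List.getD_cons_succ] at ih
    rw [ih]


theorem stripLen_eq (xs : List Int) : ∀ n, n ≤ xs.length →
    stripLen xs n = ((xs.take n).rdropWhile (fun z => z == 0)).length := by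
  intro n
  induction n with
  | zero => intro _; rw [stripLen]; simp
  | succ n ih =>
    intro hn
    have hn' : n < xs.length := by omega
    have hget : xs.getD n 1 = xs[n] := List.getD_eq_getElem xs 1 hn'
    have htake : xs.take (n + 1) = xs.take n ++ [xs[n]] := by
      rw [List.take_add_one]
      simp [List.getElem?_eq_getElem hn']
    rw [stripLen]
    by_cases hz : xs[n] = 0
    · rw [dif_pos ⟨by omega, by simp [List.getD, List.getElem?_eq_getElem hn', hz]⟩]
      simp only [Nat.add_sub_cancel]
      rw [ih (by omega), htake, List.rdropWhile_concat_pos _ _ _ (by simp [hz])]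
    · rw [dif_neg (by simp [List.getD, List.getElem?_eq_getElem hn', hz])]
      rw [htake, List.rdropWhile_concat_neg _ _ _ (by simp [hz])]
      simp [List.length_take]
      omega


theorem lb_spec (a : List Int) (x : Int) (hs : a.Pairwise (· ≤ ·)) :
    ∀ (d lo hi : Nat), hi - lo ≤ d → hi ≤ a.length →
      lo ≤ lowerBound a x lo hi ∧ (lo ≤ hi → lowerBound a x lo hi ≤ hi) ∧
      (∀ i, lo ≤ i → i < lowerBound a x lo hi → i < hi → a.getD i 0 < x) ∧
      (lowerBound a x lo hi < hi → x ≤ a.getD (lowerBound a x lo hi) 0) := by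
  have hs' := List.pairwise_iff_getElem.mp hs
  intro d
  induction d with
  | zero =>
    intro lo hi h hl
    have hge : lo ≥ hi := by omega
    rw [lowerBound, dif_pos hge]
    exact ⟨le_rfl, fun _ => by omega, fun i h1 h2 _ => by omega, fun h' => by omega⟩
  | succ d ih =>
    intro lo hi h hl
    by_cases hlh : lo ≥ hi
    · rw [lowerBound, dif_pos hlh]
      exact ⟨le_rfl, fun _ => by omega, fun i h1 h2 _ => by omega, fun h' => by omega⟩
    · rw [lowerBound, dif_neg hlh]
      by_cases hc : a.getD ((lo + hi) / 2) 0 < x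
      · simp only [if_pos hc]
        obtain ⟨h1, h2, h3, h4⟩ := ih ((lo + hi) / 2 + 1) hi (by omega) hl
        refine ⟨by omega, fun _ => h2 (by omega), ?_, h4⟩
        intro i hi1 hi2 hi3
        by_cases him : i ≤ (lo + hi) / 2
        · rcases eq_or_lt_of_le him with heq | hlt
          · rwa [heq]
          · have hibound : i < a.length := by omega
            have hmb : (lo + hi) / 2 < a.length := by omega
            have hle := hs' i ((lo + hi) / 2) hibound hmb hlt
            rw [List.getD_eq_getElem a 0 hibound]
            rw [List.getD_eq_getElem a 0 hmb] at hc
            omega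
        · exact h3 i (by omega) hi2 hi3
      · simp only [if_neg hc]
        obtain ⟨h1, h2, h3, h4⟩ := ih lo ((lo + hi) / 2) (by omega) (by omega)
        have hj2 : lowerBound a x lo ((lo + hi) / 2) ≤ (lo + hi) / 2 := h2 (by omega)
        refine ⟨h1, fun _ => by omega, ?_, ?_⟩
        · intro i hi1 hi2 _
          exact h3 i hi1 hi2 (by omega)
        · intro hjh
          rcases lt_or_eq_of_le hj2 with hlt | heq
          · exact h4 hlt
          · rw [heq]
            exact not_lt.mp hc

theorem leadZeros_zeros (z : List Int) (hz : ∀ a ∈ z, a = 0) : leadZeros z = z.length := by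
  induction z with
  | nil => simp [leadZeros]
  | cons a t ih =>
    have ha : a = 0 := hz a (by simp)
    simp [leadZeros, ha, ih (fun b hb => hz b (by simp [hb]))]

theorem consume_zeros (z avail : List Int) (hz : ∀ a ∈ z, a = 0) : consume z avail = true := by
  rw [consume]
  simp [leadZeros_zeros z hz]

theorem leadZeros_repl (k : Nat) (b : Int) (hb : b ≠ 0) (r : List Int) :
    leadZeros (List.replicate k 0 ++ b :: r) = k := by
  induction k with
  | zero => simp [leadZeros, hb]
  | succ k ih => simp [List.replicate_succ, leadZeros, ih]

theorem drop_repl (k : Nat) (b : Int) (r : List Int) :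
    (List.replicate k 0 ++ b :: r).drop (k + 1) = r := by
  rw [show k + 1 = (List.replicate k (0:Int)).length + 1 from by simp, List.drop_append]
  simp

theorem consume_cons_nonzero (b : Int) (hb : b ≠ 0) (r avail : List Int) :
    consume (b :: r) avail = consume r avail := by
  rw [consume]
  have hl : leadZeros (b :: r) = 0 := by simp [leadZeros, hb]
  simp [hl]

theorem consume_gap (k : Nat) (hk : 0 < k) (b : Int) (hb : b ≠ 0) (r avail : List Int) :
    consume (List.replicate k 0 ++ b :: r) avail =
      (if lowerBound avail ((k : Int) - 1) 0 avail.length = avail.length ∨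
          (k : Int) < avail.getD (lowerBound avail ((k : Int) - 1) 0 avail.length) 0 then false
       else consume r (avail.take (lowerBound avail ((k : Int) - 1) 0 avail.length) ++
              avail.drop (lowerBound avail ((k : Int) - 1) 0 avail.length + 1))) := by
  rw [consume]
  have hl := leadZeros_repl k b hb r
  have hlen : (List.replicate k (0:Int) ++ b :: r).length = k + r.length + 1 := by simp; omega
  rw [dif_neg (by rw [hl, hlen]; omega)]
  rw [if_pos (by rw [hl]; exact hk)]
  simp only [hl, drop_repl]

theorem go_nonempty_eq_consume (bridge : List Int) : ∀ (s c : Int) (planks avail : List Int),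
    0 ≤ c → avail.Pairwise (· ≤ ·) → (∀ v : Int, avail.count v = planks.count v) →
    can_patch_go false s c planks bridge = consume (List.replicate c.toNat 0 ++ bridge) avail := by
  induction bridge with
  | nil =>
    intro s c planks avail _ _ _
    have h2 : consume (List.replicate c.toNat 0) avail = true :=
      consume_zeros _ avail (fun a ha => List.eq_of_mem_replicate ha)
    simp [can_patch_go, h2]
  | cons b r ih =>
    intro s c planks avail hc0 hsort hcnt
    by_cases hb : b = 0
    · subst hb
      have hrw : List.replicate c.toNat (0:Int) ++ 0 :: r
          = List.replicate (c + 1).toNat 0 ++ r := by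
        rw [show (c + 1).toNat = c.toNat + 1 from by omega, List.replicate_succ']
        simp
      rw [hrw, ← ih s (c + 1) planks avail (by omega) hsort hcnt]
      simp [can_patch_go]
    · by_cases hc : c > 0
      · -- interior gap of length c
        have hk0 : 0 < c.toNat := by omega
        have hkc : ((c.toNat : Int)) = c := by omega
        rw [consume_gap c.toNat hk0 b hb r avail, hkc]
        have hmem : ∀ v : Int, v ∈ avail ↔ v ∈ planks := by
          intro v
          rw [← List.count_pos_iff, ← List.count_pos_iff, hcnt]
        obtain ⟨h1, h2, h3, h4⟩ :=
          lb_spec avail (c - 1) hsort avail.length 0 avail.length (by omega) le_rfl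
        have h2' := h2 (by omega)
        set j := lowerBound avail (c - 1) 0 avail.length with hj
        by_cases hfail : j = avail.length ∨ c < avail.getD j 0
        · -- no plank in [c-1, c] is available: A returns False as well
          have hnot : ∀ v : Int, c - 1 ≤ v → v ≤ c → v ∉ avail := by
            intro v hv1 hv2 hvmem
            obtain ⟨i, hil, hiv⟩ := List.mem_iff_getElem.mp hvmem
            have hgd : avail.getD i 0 = v := by rw [List.getD_eq_getElem avail 0 hil, hiv]
            rcases hfail with hfe | hfg
            · have hij : i < j := by omega
              have := h3 i (by omega) hij hil
              omega
            · have hjl : j < avail.length := by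
                by_contra hx
                have hje : j = avail.length := by omega
                rw [hje, List.getD_eq_default _ _ le_rfl] at hfg
                omega
              have hgdj : avail.getD j 0 = avail[j] := List.getD_eq_getElem avail 0 hjl
              by_cases hij : i < j
              · have := h3 i (by omega) hij hil
                omega
              · rcases eq_or_lt_of_le (not_lt.mp hij) with heq | hlt
                · have : avail.getD j 0 = avail.getD i 0 := by rw [heq]
                  omega
                · have hle := List.pairwise_iff_getElem.mp hsort j i hjl hil hlt
                  have hgdi : avail.getD i 0 = avail[i] := List.getD_eq_getElem avail 0 hil
                  omega
          have hnc1 : (c - 1) ∉ planks := fun h => hnot (c - 1) le_rfl (by omega) ((hmem _).mpr h)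
          have hnc : c ∉ planks := fun h => hnot c (by omega) le_rfl ((hmem _).mpr h)
          rw [if_pos hfail]
          simp [can_patch_go, hb, hc, hnc1, hnc]
        · -- the smallest available plank ≥ c-1 is c-1 or c
          rw [if_neg hfail]
          push_neg at hfail
          have hjl : j < avail.length := by
            rcases lt_or_eq_of_le h2' with h | h
            · exact h
            · exact absurd h hfail.1
          have hgd : avail.getD j 0 = avail[j] := List.getD_eq_getElem avail 0 hjl
          have hlow : c - 1 ≤ avail[j] := by have := h4 hjl; omega
          have hhigh : avail[j] ≤ c := by have := hfail.2; omega
          have hjmem : avail[j] ∈ avail := List.getElem_mem hjl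
          have hdec : avail = avail.take j ++ avail[j] :: avail.drop (j + 1) := by
            conv_lhs => rw [← List.take_append_drop j avail]
            rw [List.drop_eq_getElem_cons hjl]
          have hsubl : (avail.take j ++ avail.drop (j + 1)).Sublist avail := by
            conv_rhs => rw [hdec]
            exact List.Sublist.append_left (List.sublist_cons_self _ _) _
          have hsort' : (avail.take j ++ avail.drop (j + 1)).Pairwise (· ≤ ·) :=
            hsort.sublist hsubl
          have hcnt' : ∀ v : Int, (avail.take j ++ avail.drop (j + 1)).count v
              = avail.count v - (if v = avail[j] then 1 else 0) := by
            intro v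
            have hA : avail.count v
                = (avail.take j).count v + ((avail.drop (j + 1)).count v
                    + if v = avail[j] then 1 else 0) := by
              conv_lhs => rw [hdec]
              rw [List.count_append, List.count_cons]
              by_cases hveq : v = avail[j] <;> simp [hveq] <;> omega
            rw [List.count_append, hA]
            omega
          have hcountpos : 0 < avail.count avail[j] := List.count_pos_iff.mpr hjmem
          rcases show avail[j] = c - 1 ∨ avail[j] = c from by omega with hv | hv
          · -- the plank c-1 is taken; A takes the same plank
            have hmem1 : (c - 1) ∈ planks := (hmem _).mp (hv ▸ hjmem)
            have hrem : (PySem.List.remove? planks (c - 1)).getD planks = planks.erase (c - 1) := by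
              rw [PySem.List.remove?_eq_some_erase _ _ hmem1]; rfl
            have hcnt2 : ∀ v : Int, (avail.take j ++ avail.drop (j + 1)).count v
                = (planks.erase (c - 1)).count v := by
              intro v
              rw [hcnt']
              by_cases hveq : v = c - 1
              · subst hveq
                rw [List.count_erase_self, if_pos hv.symm, hcnt]
              · rw [List.count_erase_of_ne hveq, if_neg (fun h => hveq (h.trans hv)), hcnt]
                omega
            have hstep := ih (if c > s then c else s) 0 (planks.erase (c - 1))
              (avail.take j ++ avail.drop (j + 1)) le_rfl hsort' hcnt2
            simp only [Int.toNat_zero, List.replicate_zero, List.nil_append] at hstep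
            simp [can_patch_go, hb, hc, hmem1, hrem, hstep]
          · -- c-1 is unavailable, the plank c is taken; A does the same
            have hnc1 : (c - 1) ∉ avail := by
              intro hvmem
              obtain ⟨i, hil, hiv⟩ := List.mem_iff_getElem.mp hvmem
              have hgdi : avail.getD i 0 = avail[i] := List.getD_eq_getElem avail 0 hil
              by_cases hij : i < j
              · have := h3 i (by omega) hij hil
                omega
              · rcases eq_or_lt_of_le (not_lt.mp hij) with heq | hlt
                · have : avail.getD j 0 = avail.getD i 0 := by rw [heq]
                  omega
                · have hle := List.pairwise_iff_getElem.mp hsort j i hjl hil hlt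
                  omega
            have hnp1 : (c - 1) ∉ planks := fun h => hnc1 ((hmem _).mpr h)
            have hmem2 : c ∈ planks := (hmem _).mp (hv ▸ hjmem)
            have hrem : (PySem.List.remove? planks c).getD planks = planks.erase c := by
              rw [PySem.List.remove?_eq_some_erase _ _ hmem2]; rfl
            have hcnt2 : ∀ v : Int, (avail.take j ++ avail.drop (j + 1)).count v
                = (planks.erase c).count v := by
              intro v
              rw [hcnt']
              by_cases hveq : v = c
              · subst hveq
                rw [List.count_erase_self, if_pos hv.symm, hcnt]
              · rw [List.count_erase_of_ne hveq, if_neg (fun h => hveq (h.trans hv)), hcnt]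
                omega
            have hstep := ih (if c > s then c else s) 0 (planks.erase c)
              (avail.take j ++ avail.drop (j + 1)) le_rfl hsort' hcnt2
            simp only [Int.toNat_zero, List.replicate_zero, List.nil_append] at hstep
            simp [can_patch_go, hb, hc, hnp1, hmem2, hrem, hstep]
      · -- c = 0: the nonzero element just passes
        have hc' : c = 0 := by omega
        subst hc'
        simp only [Int.toNat_zero, List.replicate_zero, List.nil_append]
        rw [consume_cons_nonzero b hb r avail]
        have hstep := ih (if s < 0 then 0 else s) 0 planks avail le_rfl hsort hcnt
        simp only [Int.toNat_zero, List.replicate_zero, List.nil_append] at hstep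
        simp [can_patch_go, hb, hstep]

theorem all_congr_mem (l : List Nat) (f g : Nat → Bool) (h : ∀ x ∈ l, f x = g x) :
    l.all f = l.all g := by
  induction l with
  | nil => rfl
  | cons a t ih => simp only [List.all_cons, h a (by simp), ih (fun x hx => h x (by simp [hx]))]

theorem run1_false_cons (a : Int) (u : List Int) : run1 false (a :: u) = run1 (a == 0) u := by
  by_cases ha : a = 0 <;> simp [run1, ha, show ∀ b:Int, b ≠ 0 → (b == 0) = false from fun b hb => by simp [hb]]

-- ===== VERDICT (by name: the statement is the Claim_ definition above) =====
theorem can_patch_spec : Claim_equal_can_patch := by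
  intro bridge planks _
  unfold Spec_can_patch can_patch can_patch_alt
  by_cases hp : planks = []
  · subst hp
    rw [show (([] : List Int).length == 0) = true from rfl,
      if_pos (show ([] : List Int).length = 0 from rfl)]
    rw [go_empty_eq_runA bridge 0 0 le_rfl]
    set u := bridge.rdropWhile (fun z => z == 0) with hu
    have hstrip : stripLen bridge bridge.length = u.length := by
      rw [stripLen_eq bridge bridge.length le_rfl, List.take_length]
    have hz : ∀ a ∈ bridge.rtakeWhile (fun z : Int => z == 0), a = 0 := by
      intro a ha
      simpa using List.mem_rtakeWhile_imp ha
    have hA : runA 0 bridge = runA 0 u := by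
      conv_lhs => rw [← List.rdropWhile_append_rtakeWhile (p := fun z : Int => z == 0) (l := bridge)]
      rw [runA_append_zeros _ hz u 0]
    obtain ⟨t, ht⟩ := List.rdropWhile_prefix (p := fun z : Int => z == 0) (l := bridge)
    have hone : ∀ i, i < u.length → bridge.getD i 1 = u.getD i 1 := by
      intro i hi
      rw [← ht, List.getD_append _ _ _ _ hi]
    have hall : (List.range (stripLen bridge bridge.length - 1)).all
          (fun i => !(bridge.getD i 1 == 0 && bridge.getD (i + 1) 1 == 0))
        = (List.range (u.length - 1)).all
          (fun i => !(u.getD i 1 == 0 && u.getD (i + 1) 1 == 0)) := by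
      rw [hstrip]
      apply all_congr_mem
      intro i hi
      have hi' : i < u.length - 1 := List.mem_range.mp hi
      rw [hone i (by omega), hone (i + 1) (by omega)]
    rw [hall, rangeAll_eq_noAdj u, hA]
    match u, hu with
    | [], _ => simp [runA, noAdj]
    | a :: u', hu' =>
      have hlast : ∀ h : (a :: u') ≠ [], (a :: u').getLast h ≠ 0 := by
        intro h
        have := List.rdropWhile_last_not (p := fun z : Int => z == 0) (l := bridge) (by rw [← hu']; simp)
        simp only [← hu'] at this ⊢
        simpa using this
      rw [runA_eq_run1 (a :: u') hlast 0 le_rfl (by simp)]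
      rw [noAdj_eq_run1 u' a]
      simp [run1_false_cons]
  · have hlen : planks.length ≠ 0 := by simpa [List.length_eq_zero_iff] using hp
    rw [if_neg hlen]
    rw [show (planks.length == 0) = false from by simpa using hlen]
    have hsort : (PySem.List.sorted planks (fun x => x) false).Pairwise (· ≤ ·) :=
      PySem.List.sorted_pairwise planks (fun x => x)
    have hcnt : ∀ v : Int, (PySem.List.sorted planks (fun x => x) false).count v
        = planks.count v := fun v => (PySem.List.sorted_perm planks (fun x => x) false).count_eq v
    have := go_nonempty_eq_consume bridge 0 0 planks
      (PySem.List.sorted planks (fun x => x) false) le_rfl hsort hcnt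
    simpa using this
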